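-- pv_equiv track=rewrite | github.com/connorhp/adventOfCode2023 | day17/day17.py | getPast
-- ===== SOURCE A (Python) =====
-- def getPast(links, x,y):
--     xs = []
--     ys = []
--     prevx = x
--     prevy = y
--     back = 4
--     for _ in range(back):
--         if (prevx, prevy) in links:
--             xs.append(prevx)
--             ys.append(prevy)
--             prev = links.get((prevx, prevy))
--             prevx, prevy = prev
--     return xs, ys
-- ===== SOURCE B (Python) =====
-- def getPast(links, x, y):
--     def go(cx, cy, n):
--         if n == 0 or (cx, cy) not in links:
--             return [], []
--         nx, ny = links[(cx, cy)]
--         xs, ys = go(nx, ny, n - 1)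
--         return [cx] + xs, [cy] + ys
--     return go(x, y, 4)
-- ===== Notes on version B (the rewrite author's own statement) =====
-- stated objective: simpler
-- what changed: Replaces the fixed-4-iteration loop with mutable prevx/prevy/append state by a recursive chain-follower that stops at the first missing key and prepends the current coordinates to the recursive result.
import Mathlib
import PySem

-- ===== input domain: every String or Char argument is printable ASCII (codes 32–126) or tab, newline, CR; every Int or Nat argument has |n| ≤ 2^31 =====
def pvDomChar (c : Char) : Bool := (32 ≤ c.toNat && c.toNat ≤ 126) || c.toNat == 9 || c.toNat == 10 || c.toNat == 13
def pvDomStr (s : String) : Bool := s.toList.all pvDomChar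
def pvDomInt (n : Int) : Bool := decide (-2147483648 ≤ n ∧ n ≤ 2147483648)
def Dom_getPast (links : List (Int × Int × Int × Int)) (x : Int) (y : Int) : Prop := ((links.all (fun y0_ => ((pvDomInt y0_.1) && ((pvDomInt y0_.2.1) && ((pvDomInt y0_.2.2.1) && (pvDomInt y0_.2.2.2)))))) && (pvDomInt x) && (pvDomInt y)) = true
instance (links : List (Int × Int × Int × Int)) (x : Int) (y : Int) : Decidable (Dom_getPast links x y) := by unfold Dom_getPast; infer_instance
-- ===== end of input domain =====

-- B replaces the 4-iteration loop with mutable state by a recursive chain-follower (simpler decomposition).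

-- shared dict primitive: `(a,b) in links` / `links.get((a,b))` — first matching key
def pvLookup : List (Int × Int × Int × Int) → Int → Int → Option (Int × Int)
  | [], _, _ => none
  | (kx, ky, vx, vy) :: rest, a, b =>
      if kx = a ∧ ky = b then some (vx, vy) else pvLookup rest a b

-- ===== PORT A =====
def getPast (links : List (Int × Int × Int × Int)) (x : Int) (y : Int) : List Int × List Int :=
  -- xs = []; ys = []; prevx, prevy = x, y; for _ in range(4): …
  let st := (List.range 4).foldl
    (fun (s : List Int × List Int × Int × Int) _ =>
      match pvLookup links s.2.2.1 s.2.2.2 with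
      | some (nx, ny) => (s.1 ++ [s.2.2.1], s.2.1 ++ [s.2.2.2], nx, ny)
      | none => s)
    ([], [], x, y)
  (st.1, st.2.1)

-- ===== PORT B =====
def goAlt (links : List (Int × Int × Int × Int)) (cx cy : Int) : Nat → List Int × List Int
  | 0 => ([], [])
  | n + 1 =>
      match pvLookup links cx cy with
      | none => ([], [])
      | some (nx, ny) =>
          let r := goAlt links nx ny n
          (cx :: r.1, cy :: r.2)

def getPast_alt (links : List (Int × Int × Int × Int)) (x : Int) (y : Int) : List Int × List Int :=
  goAlt links x y 4

-- ===== PRECONDITION & SPEC =====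
def Spec_getPast (links : List (Int × Int × Int × Int)) (x : Int) (y : Int) (out : List Int × List Int) : Prop := out = getPast_alt links x y
instance (links : List (Int × Int × Int × Int)) (x : Int) (y : Int) (out : List Int × List Int) : Decidable (Spec_getPast links x y out) := by unfold Spec_getPast; infer_instance

-- ===== CLAIM (what is proved, stated in full; the proofs are below) =====
def Claim_equal_getPast : Prop := ∀ (links : List (Int × Int × Int × Int)) (x : Int) (y : Int), Dom_getPast links x y → Spec_getPast links x y (getPast links x y)

-- ===== LEMMAS AND PROOFS =====

theorem getPast_eq (links : List (Int × Int × Int × Int)) (x y : Int) :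
    getPast links x y = getPast_alt links x y := by
  simp only [getPast, getPast_alt, List.range, List.range.loop, List.foldl]
  cases h0 : pvLookup links x y with
  | none => simp [goAlt, h0]
  | some p0 =>
    obtain ⟨x1, y1⟩ := p0
    cases h1 : pvLookup links x1 y1 with
    | none => simp [goAlt, h0, h1]
    | some p1 =>
      obtain ⟨x2, y2⟩ := p1
      cases h2 : pvLookup links x2 y2 with
      | none => simp [goAlt, h0, h1, h2]
      | some p2 =>
        obtain ⟨x3, y3⟩ := p2
        cases h3 : pvLookup links x3 y3 with
        | none => simp [goAlt, h0, h1, h2, h3]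
        | some p3 =>
          obtain ⟨x4, y4⟩ := p3
          simp [goAlt, h0, h1, h2, h3]

-- ===== VERDICT (by name: the statement is the Claim_ definition above) =====
theorem getPast_spec : Claim_equal_getPast := by
  intro links x y _
  exact getPast_eq links x y
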